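-- pv_equiv track=rewrite | github.com/frode-uit/Obliger-VID | Unasssigned/find_convex_hull_graham_ex16_12_fn.py | getRightmostLowestIndex
-- ===== SOURCE A (Python) =====
-- def getRightmostLowestIndex(p):
--     rightMostIndex = 0;
--     rightMostX = p[0][0];
--     rightMostY = p[0][1];
--
--     for i in range(1, len(p)):
--         if rightMostY > p[i][1]:
--             rightMostY = p[i][1]
--             rightMostX = p[i][0]
--             rightMostIndex = i
--         elif rightMostY == p[i][1] and rightMostX < p[i][0]:
--             rightMostX = p[i][0]
--             rightMostIndex = i
--
--     return rightMostIndex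
-- ===== SOURCE B (Python) =====
-- def getRightmostLowestIndex(p):
--     # pass 1: the lowest y-coordinate (min raises on an empty list, like A's p[0])
--     minY = min(y for _, y in p)
--     # pass 2: among points at minY, the first index holding the largest x
--     bestIndex = -1
--     bestX = None
--     for i, (x, y) in enumerate(p):
--         if y == minY and (bestX is None or bestX < x):
--             bestX = x
--             bestIndex = i
--     return bestIndex
-- ===== Notes on version B (the rewrite author's own statement) =====
-- stated objective: alternative
-- what changed: A's single fused scan tracking (index, x, y) is split into two passes: first compute the minimum y, then scan once more keeping the first index with the largest x among points at that minimum y.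
import Mathlib
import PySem

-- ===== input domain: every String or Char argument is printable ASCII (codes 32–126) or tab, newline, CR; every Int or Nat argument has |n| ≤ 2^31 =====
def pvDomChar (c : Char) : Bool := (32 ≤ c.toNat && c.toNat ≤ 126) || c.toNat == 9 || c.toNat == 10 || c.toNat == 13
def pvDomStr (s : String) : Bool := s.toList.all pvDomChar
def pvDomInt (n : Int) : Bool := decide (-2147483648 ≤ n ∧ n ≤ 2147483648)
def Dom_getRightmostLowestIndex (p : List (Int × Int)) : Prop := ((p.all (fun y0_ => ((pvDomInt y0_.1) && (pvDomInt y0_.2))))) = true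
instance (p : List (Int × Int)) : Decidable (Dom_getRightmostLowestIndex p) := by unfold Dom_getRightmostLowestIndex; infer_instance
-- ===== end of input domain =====

-- B replaces A's single fused scan by two passes (min-y, then rightmost among min-y); return values proved equal on nonempty lists.

-- ===== PORT A =====
-- A's loop over range(1, len(p)) carrying (rightMostIndex, rightMostX, rightMostY);
-- p[0]/p[i] are in range on every nonempty list, so pyGetD with a dummy default is exact there.
def getRightmostLowestIndex (p : List (Int × Int)) : Int :=
  let h0 := PySem.List.pyGetD p 0 (0, 0)
  let s := (PySem.List.pyRange 1 (p.length : Int) 1).foldl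
    (fun (st : Int × Int × Int) i =>
      let q := PySem.List.pyGetD p i (0, 0)
      if q.2 < st.2.2 then (i, q.1, q.2)
      else if st.2.2 = q.2 ∧ st.2.1 < q.1 then (i, q.1, st.2.2)
      else st)
    (0, h0.1, h0.2)
  s.1

-- ===== PORT B =====
-- Source B: minY = min(y for _,y in p); then one enumerate loop tracking (bestIndex, bestX : Option Int).
-- min() raises ValueError on [], mirrored by min? = none (Pre_ excludes that input).
def getRightmostLowestIndex_alt (p : List (Int × Int)) : Int :=
  match PySem.List.min? (p.map Prod.snd) (fun y => y) with
  | none => -1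
  | some minY =>
    let s := (PySem.List.enumerate p 0).foldl
      (fun (st : Int × Option Int) iq =>
        if iq.2.2 = minY ∧ (st.2.isNone ∨ st.2.getD 0 < iq.2.1)
        then (iq.1, some iq.2.1) else st)
      (-1, none)
    s.1

-- ===== PRECONDITION & SPEC =====
-- A raises IndexError on the empty list (p[0]); Pre_ excludes exactly that input.
def Pre_getRightmostLowestIndex (p : List (Int × Int)) : Prop := p ≠ []
instance (p : List (Int × Int)) : Decidable (Pre_getRightmostLowestIndex p) := by unfold Pre_getRightmostLowestIndex; infer_instance
def pvWitness_getRightmostLowestIndex : (List (Int × Int)) := [(1, 2), (3, 2), (0, 0)]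

def Spec_getRightmostLowestIndex (p : List (Int × Int)) (out : Int) : Prop := out = getRightmostLowestIndex_alt p
instance (p : List (Int × Int)) (out : Int) : Decidable (Spec_getRightmostLowestIndex p out) := by unfold Spec_getRightmostLowestIndex; infer_instance

-- ===== CLAIM (what is proved, stated in full; the proofs are below) =====
def Claim_equal_getRightmostLowestIndex : Prop := ∀ (p : List (Int × Int)), Dom_getRightmostLowestIndex p → Pre_getRightmostLowestIndex p → Spec_getRightmostLowestIndex p (getRightmostLowestIndex p)

-- ===== LEMMAS AND PROOFS =====

-- A's step function on an (index, point) pair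
def stepA (st : Int × Int × Int) (iq : Int × (Int × Int)) : Int × Int × Int :=
  if iq.2.2 < st.2.2 then (iq.1, iq.2.1, iq.2.2)
  else if st.2.2 = iq.2.2 ∧ st.2.1 < iq.2.1 then (iq.1, iq.2.1, st.2.2)
  else st

-- B's step function, parameterized by the global minimum M
def stepB (M : Int) (st : Int × Option Int) (iq : Int × (Int × Int)) : Int × Option Int :=
  if iq.2.2 = M ∧ (st.2.isNone ∨ st.2.getD 0 < iq.2.1) then (iq.1, some iq.2.1) else st

-- running minimum of the y-coordinates of l, seeded with y0
def minY2 (l : List (Int × Int)) (y0 : Int) : Int := l.foldl (fun m q => min m q.2) y0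

lemma minY2_le_init (l : List (Int × Int)) (y0 : Int) : minY2 l y0 ≤ y0 := by
  have h : minY2 l y0 = (l.map Prod.snd).foldl min y0 := by
    simp [minY2, List.foldl_map]
  rw [h]
  exact (PySem.List.foldl_min_le (l.map Prod.snd) y0).1

-- bridge: A's index loop with pyGetD equals a fold over the enumerated suffix
lemma bridge {σ : Type} (g : σ → Int × (Int × Int) → σ) :
    ∀ (l p : List (Int × Int)) (s : Nat), p.drop s = l → ∀ (st : σ),
    (PySem.List.pyRange (s : Int) (p.length : Int) 1).foldl
        (fun acc j => g acc (j, PySem.List.pyGetD p j (0, 0))) st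
      = (PySem.List.enumerate l (s : Int)).foldl g st := by
  intro l
  induction l with
  | nil =>
    intro p s hdrop st
    have hle : p.length ≤ s := List.drop_eq_nil_iff.mp hdrop
    rw [PySem.List.pyRange_one_eq_nil (by exact_mod_cast hle)]
    simp [PySem.List.enumerate]
  | cons q t ih =>
    intro p s hdrop st
    have hs : s < p.length := by
      by_contra hge
      rw [List.drop_eq_nil_iff.mpr (by omega)] at hdrop
      simp at hdrop
    have hget : PySem.List.pyGetD p (s : Int) (0, 0) = q := by
      rw [PySem.List.pyGetD_natCast]
      have h0 : p[s]? = some q := by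
        have h1 : (p.drop s)[0]? = some q := by rw [hdrop]; rfl
        rw [List.getElem?_drop] at h1
        simpa using h1
      simp [List.getD, h0]
    rw [PySem.List.pyRange_one_cons (by exact_mod_cast hs)]
    rw [PySem.List.enumerate_cons]
    simp only [List.foldl_cons, hget]
    have hdrop' : p.drop (s + 1) = t := by
      have : p.drop (s + 1) = (p.drop s).drop 1 := by
        rw [List.drop_drop]
      rw [this, hdrop]
      simp
    have := ih p (s + 1) hdrop' (g st ((s : Int), q))
    rw [show ((s : Int) + 1) = ((s + 1 : Nat) : Int) by push_cast; ring]
    exact this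

-- the simulation relation between A's state and B's state (with global min M)
def SimRel (M : Int) (a : Int × Int × Int) (b : Int × Option Int) : Prop :=
  (a.2.2 = M ∧ b.2 = some a.2.1 ∧ b.1 = a.1) ∨ (a.2.2 ≠ M ∧ b.2 = none ∧ b.1 = -1)

-- after one step, A's running y is the min of the old y and the new point's y
lemma stepA_snd (i X Y s : Int) (q : Int × Int) :
    (stepA (i, X, Y) (s, q)).2.2 = min Y q.2 := by
  simp only [stepA]
  split_ifs with c1 c2
  · simp only
    omega
  · obtain ⟨c2a, _⟩ := c2
    simp only
    omega
  · simp only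
    omega

-- one step preserves the simulation relation
lemma step_rel (M i X Y s : Int) (q : Int × Int) (b : Int × Option Int)
    (hq2 : M ≤ q.2) (hMY : M ≤ Y) (hR : SimRel M (i, X, Y) b) :
    SimRel M (stepA (i, X, Y) (s, q)) (stepB M b (s, q)) := by
  obtain ⟨j, o⟩ := b
  rcases hR with ⟨h1, h2, h3⟩ | ⟨h1, h2, h3⟩ <;> simp only at h1 h2 h3 <;> subst h2 h3
  · -- Y = M, b = (i, some X)
    subst h1
    by_cases hq : q.2 = Y
    · by_cases hx : X < q.1
      · left
        simp [stepA, stepB, hq, hx]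
      · left
        simp [stepA, stepB, hq, hx]
    · left
      have hlt : Y < q.2 := by omega
      simp [stepA, stepB, hq, show ¬ q.2 < Y by omega, show ¬ (Y = q.2 ∧ X < q.1) by omega]
  · -- Y ≠ M, b = (-1, none)
    have hMY' : M < Y := by omega
    by_cases hq : q.2 = M
    · left
      simp [stepA, stepB, hq, hMY']
    · right
      refine ⟨?_, ?_, ?_⟩
      · rw [stepA_snd]
        omega
      · simp [stepB, hq]
      · simp [stepB, hq]

-- main invariant: folding stepA and stepB over the same enumerated suffix
lemma main_inv :
    ∀ (r : List (Int × Int)) (s : Int) (a : Int × Int × Int) (b : Int × Option Int),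
    SimRel (minY2 r a.2.2) a b →
    ((PySem.List.enumerate r s).foldl stepA a).1
      = ((PySem.List.enumerate r s).foldl (stepB (minY2 r a.2.2)) b).1 := by
  intro r
  induction r with
  | nil =>
    intro s a b hR
    simp only [PySem.List.enumerate, List.foldl_nil]
    rcases hR with ⟨_, _, h⟩ | ⟨hne, _, _⟩
    · omega
    · exact absurd rfl hne
  | cons q t ih =>
    intro s a b hR
    obtain ⟨i, X, Y⟩ := a
    set M := minY2 (q :: t) (i, X, Y).2.2 with hM
    have hMdef : M = minY2 t (min Y q.2) := rfl
    have hMle : M ≤ min Y q.2 := hMdef ▸ minY2_le_init t (min Y q.2)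
    rw [PySem.List.enumerate_cons]
    simp only [List.foldl_cons]
    have hnext : minY2 t (stepA (i, X, Y) (s, q)).2.2 = M := by
      rw [stepA_snd]
      exact hMdef.symm
    have key : SimRel M (stepA (i, X, Y) (s, q)) (stepB M b (s, q)) :=
      step_rel M i X Y s q b (le_trans hMle (min_le_right _ _))
        (le_trans hMle (min_le_left _ _)) hR
    have := ih (s + 1) (stepA (i, X, Y) (s, q)) (stepB M b (s, q)) (hnext ▸ key)
    rw [hnext] at this
    exact this

-- ===== VERDICT (by name: the statement is the Claim_ definition above) =====
theorem getRightmostLowestIndex_spec : Claim_equal_getRightmostLowestIndex := by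
  intro p _ hpre
  unfold Spec_getRightmostLowestIndex
  obtain ⟨a, l, rfl⟩ : ∃ a l, p = a :: l := by
    cases p with
    | nil => exact absurd rfl hpre
    | cons a l => exact ⟨a, l, rfl⟩
  -- evaluate B's min()
  have hmin : PySem.List.min? ((a :: l).map Prod.snd) (fun y => y) = some (minY2 l a.2) := by
    rw [List.map_cons, PySem.List.min?_id_cons]
    simp [minY2, List.foldl_map]
  -- rewrite A's loop as a fold of stepA over enumerate l 1
  have hA : getRightmostLowestIndex (a :: l)
      = ((PySem.List.enumerate l (1 : Int)).foldl stepA (0, a.1, a.2)).1 := by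
    unfold getRightmostLowestIndex
    simp only [PySem.List.pyGetD_zero_cons]
    have hb := bridge stepA l (a :: l) 1 (by simp) (0, a.1, a.2)
    simp only [Nat.cast_one] at hb
    rw [← hb]
    rfl
  -- rewrite B as a fold of stepB over (0,a) :: enumerate l 1
  have hB : getRightmostLowestIndex_alt (a :: l)
      = ((PySem.List.enumerate l (1 : Int)).foldl (stepB (minY2 l a.2))
          (stepB (minY2 l a.2) (-1, none) (0, a))).1 := by
    unfold getRightmostLowestIndex_alt
    rw [hmin]
    simp only [PySem.List.enumerate_cons, List.foldl_cons]
    rfl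
  rw [hA, hB]
  -- the seeded states are related
  apply main_inv l 1 (0, a.1, a.2) (stepB (minY2 l a.2) (-1, none) (0, a))
  by_cases h : a.2 = minY2 l a.2
  · exact Or.inl ⟨h, by simp [stepB, ← h], by simp [stepB, ← h]⟩
  · exact Or.inr ⟨h, by simp [stepB, h], by simp [stepB, h]⟩
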